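-- pv_equiv track=rewrite | github.com/kjgaulton/pipelines | variant_annotation_matrix/vam.py | annotate_variants
-- ===== SOURCE A (Python) =====
-- def annotate_variants(variant_positions, annotations, annotation_subset):
--     annotations_per_variant = []
--     for variant_position in variant_positions:
--         annotations_per_variant.append(set())
--         for annotation_name, interval_list in annotations.items():
--             empty_interval_count = 0
--             for interval in interval_list:
--                 if interval[1] < variant_position:
--                     empty_interval_count += 1
--                 elif interval[0] > variant_position:
--                     break
--                 else:
--                     if annotation_subset:
--                         if annotation_name in annotation_subset:
--                             annotations_per_variant[-1].add(annotation_name)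
--                     else:
--                         annotations_per_variant[-1].add(annotation_name)
--                     break
--             for x in range(empty_interval_count):
--                 interval_list.pop(0)
--     return annotations_per_variant
-- ===== SOURCE B (Python) =====
-- def annotate_variants(variant_positions, annotations, annotation_subset):
--     # annotation-major sweep with a monotone cursor per annotation; does not
--     # mutate the input (A pops consumed intervals from annotations in place).
--     hits = [set() for _ in variant_positions]
--     for name, intervals in annotations.items():
--         if annotation_subset and name not in annotation_subset:
--             continue
--         j, n = 0, len(intervals)
--         for i, p in enumerate(variant_positions):
--             while j < n and intervals[j][1] < p:
--                 j += 1
--             if j < n and intervals[j][0] <= p: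
--                 hits[i].add(name)
--     return hits
-- ===== Notes on version B (the rewrite author's own statement) =====
-- stated objective: faster
-- what changed: B transposes the loops (annotation-major instead of variant-major), replaces A's repeated list.pop(0) prefix deletion with a monotone integer cursor per annotation, and skips annotations outside annotation_subset entirely; B also leaves the input annotations unmutated (A pops consumed intervals in place) - the equivalence proved is about the return value.
import Mathlib
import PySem

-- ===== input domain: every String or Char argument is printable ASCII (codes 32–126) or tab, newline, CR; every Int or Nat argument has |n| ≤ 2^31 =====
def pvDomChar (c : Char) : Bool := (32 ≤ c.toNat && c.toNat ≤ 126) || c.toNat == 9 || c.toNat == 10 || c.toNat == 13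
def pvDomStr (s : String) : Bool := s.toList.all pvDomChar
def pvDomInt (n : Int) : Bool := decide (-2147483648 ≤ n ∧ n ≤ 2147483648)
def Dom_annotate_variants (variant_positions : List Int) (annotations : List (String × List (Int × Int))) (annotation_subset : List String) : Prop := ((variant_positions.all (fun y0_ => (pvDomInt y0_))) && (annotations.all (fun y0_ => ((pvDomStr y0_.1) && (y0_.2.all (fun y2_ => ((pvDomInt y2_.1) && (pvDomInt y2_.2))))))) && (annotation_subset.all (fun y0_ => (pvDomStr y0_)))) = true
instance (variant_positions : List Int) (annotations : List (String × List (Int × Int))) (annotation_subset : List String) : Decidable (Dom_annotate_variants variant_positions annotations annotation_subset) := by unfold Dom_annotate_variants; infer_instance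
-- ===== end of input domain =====

-- B transposes the loops (annotation-major, monotone cursor, no pop(0)); return values are
-- proved equal — note A additionally mutates the interval lists of `annotations` in place, B does not.

-- ===== PORT A =====
-- inner `for interval in interval_list` loop: counts the skipped prefix (end < p),
-- `break` returns; .2 says whether the variant was covered
def pvScanA (p : Int) : List (Int × Int) → Nat × Bool
  | [] => (0, false)
  | iv :: rest =>
    if iv.2 < p then
      let r := pvScanA p rest
      (r.1 + 1, r.2)
    else if iv.1 > p then (0, false)
    else (0, true)

-- body of the `for annotation_name, interval_list in annotations.items()` loop;
-- st.1 rebuilds the dict with the popped (dropped) prefixes, st.2 is the row set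
def pvInnerA (p : Int) (subset : List String)
    (st : List (String × List (Int × Int)) × List String)
    (kv : String × List (Int × Int)) : List (String × List (Int × Int)) × List String :=
  let r := pvScanA p kv.2
  let s :=
    if r.2 then
      if !subset.isEmpty then
        if subset.contains kv.1 then PySem.Set.add st.2 kv.1 else st.2
      else PySem.Set.add st.2 kv.1
    else st.2
  (st.1 ++ [(kv.1, kv.2.drop r.1)], s)

def annotate_variants (variant_positions : List Int) (annotations : List (String × List (Int × Int))) (annotation_subset : List String) : List (List String) :=
  match variant_positions with
  | [] => []
  | p :: ps =>
    let step := annotations.foldl (pvInnerA p annotation_subset) ([], [])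
    step.2 :: annotate_variants ps step.1 annotation_subset

-- ===== PORT B =====
-- the `while j < n and intervals[j][1] < p: j += 1` cursor advance
def pvAdvance (p : Int) : List (Int × Int) → List (Int × Int)
  | [] => []
  | iv :: rest => if iv.2 < p then pvAdvance p rest else iv :: rest

-- inner `for i, p in enumerate(variant_positions)` loop of B for one annotation
def pvMarkB (name : String) : List Int → List (Int × Int) → List (List String) → List (List String)
  | [], _, hits => hits
  | _ :: _, _, [] => []
  | p :: ps, ivs, h :: hs =>
    let ivs' := pvAdvance p ivs
    let h' := match ivs' with
      | [] => h
      | iv :: _ => if iv.1 ≤ p then PySem.Set.add h name else h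
    h' :: pvMarkB name ps ivs' hs

-- one iteration of B's outer loop (the `continue` gate, then the sweep)
def pvStepB (vps : List Int) (subset : List String)
    (hits : List (List String)) (kv : String × List (Int × Int)) : List (List String) :=
  if !subset.isEmpty && !subset.contains kv.1 then hits
  else pvMarkB kv.1 vps kv.2 hits

def annotate_variants_alt (variant_positions : List Int) (annotations : List (String × List (Int × Int))) (annotation_subset : List String) : List (List String) :=
  annotations.foldl (pvStepB variant_positions annotation_subset)
    (variant_positions.map fun _ => ([] : List String))

-- ===== PRECONDITION & SPEC =====
def Spec_annotate_variants (variant_positions : List Int) (annotations : List (String × List (Int × Int))) (annotation_subset : List String) (out : List (List String)) : Prop := out = annotate_variants_alt variant_positions annotations annotation_subset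
instance (variant_positions : List Int) (annotations : List (String × List (Int × Int))) (annotation_subset : List String) (out : List (List String)) : Decidable (Spec_annotate_variants variant_positions annotations annotation_subset out) := by unfold Spec_annotate_variants; infer_instance

-- ===== CLAIM (what is proved, stated in full; the proofs are below) =====
def Claim_equal_annotate_variants : Prop := ∀ (variant_positions : List Int) (annotations : List (String × List (Int × Int))) (annotation_subset : List String), Dom_annotate_variants variant_positions annotations annotation_subset → Spec_annotate_variants variant_positions annotations annotation_subset (annotate_variants variant_positions annotations annotation_subset)

-- ===== LEMMAS AND PROOFS =====

-- A with the per-variant row sets seeded from `hits` (generalisation of A for the loop swap)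
def pvRowsA (subset : List String) : List Int → List (String × List (Int × Int)) → List (List String) → List (List String)
  | [], _, hits => hits
  | _ :: _, _, [] => []
  | p :: ps, anns, h :: hs =>
    let step := anns.foldl (pvInnerA p subset) ([], h)
    step.2 :: pvRowsA subset ps step.1 hs

theorem pvScanA_drop (p : Int) : ∀ l : List (Int × Int), List.drop (pvScanA p l).1 l = pvAdvance p l := by
  intro l
  induction l with
  | nil => rfl
  | cons iv rest ih =>
    by_cases h : iv.2 < p
    · simp [pvScanA, pvAdvance, h, ih]
    · by_cases h2 : iv.1 > p <;> simp [pvScanA, pvAdvance, h, h2]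

theorem pvScanA_hit (p : Int) : ∀ l : List (Int × Int),
    (pvScanA p l).2 = (match pvAdvance p l with
      | [] => false
      | iv :: _ => decide (iv.1 ≤ p)) := by
  intro l
  induction l with
  | nil => rfl
  | cons iv rest ih =>
    by_cases h : iv.2 < p
    · simp [pvScanA, pvAdvance, h, ih]
    · by_cases h2 : iv.1 > p
      · have h3 : ¬ iv.1 ≤ p := by omega
        simp [pvScanA, pvAdvance, h, h2, h3]
      · have h3 : iv.1 ≤ p := by omega
        simp [pvScanA, pvAdvance, h, h2, h3]

-- the row set A builds for one annotation entry, with the subset gate folded into one condition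
theorem innerA_snd (p : Int) (subset : List String) (st : List (String × List (Int × Int)) × List String)
    (kv : String × List (Int × Int)) :
    (pvInnerA p subset st kv).2 =
      if (!subset.isEmpty && !subset.contains kv.1) = true then st.2
      else if (pvScanA p kv.2).2 = true then PySem.Set.add st.2 kv.1 else st.2 := by
  by_cases hie : subset.isEmpty = true <;> by_cases hc : kv.1 ∈ subset <;>
    simp [pvInnerA, hie, hc]

theorem pvInnerA_eq (p : Int) (subset : List String) (pre : List (String × List (Int × Int)))
    (h : List String) (kv : String × List (Int × Int)) :
    pvInnerA p subset (pre, h) kv =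
      (pre ++ [(kv.1, kv.2.drop (pvScanA p kv.2).1)],
       if (!subset.isEmpty && !subset.contains kv.1) = true then h
       else if (pvScanA p kv.2).2 = true then PySem.Set.add h kv.1 else h) :=
  Prod.ext rfl (innerA_snd p subset (pre, h) kv)

theorem foldl_innerA_seed (p : Int) (subset : List String) :
    ∀ (anns : List (String × List (Int × Int))) (pre : List (String × List (Int × Int))) (h : List String),
    anns.foldl (pvInnerA p subset) (pre, h) =
      (pre ++ (anns.foldl (pvInnerA p subset) ([], h)).1,
       (anns.foldl (pvInnerA p subset) ([], h)).2) := by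
  intro anns
  induction anns with
  | nil => intro pre h; simp
  | cons kv anns ih =>
    intro pre h
    simp only [List.foldl_cons]
    rw [pvInnerA_eq p subset pre h kv, pvInnerA_eq p subset [] h kv, List.nil_append]
    rw [ih, ih [(kv.1, kv.2.drop (pvScanA p kv.2).1)]]
    simp

theorem pvMarkB_length (name : String) :
    ∀ (vps : List Int) (ivs : List (Int × Int)) (hits : List (List String)),
    hits.length = vps.length → (pvMarkB name vps ivs hits).length = hits.length := by
  intro vps
  induction vps with
  | nil => intro ivs hits _; rfl
  | cons p ps ih =>
    intro ivs hits hlen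
    cases hits with
    | nil => simp at hlen
    | cons h hs =>
      simp only [pvMarkB, List.length_cons]
      rw [ih _ hs (by simpa using hlen)]

theorem pvStepB_length (vps : List Int) (subset : List String)
    (hits : List (List String)) (kv : String × List (Int × Int))
    (hlen : hits.length = vps.length) : (pvStepB vps subset hits kv).length = hits.length := by
  unfold pvStepB
  split
  · rfl
  · exact pvMarkB_length kv.1 vps kv.2 hits hlen

-- one step of B's inner sweep, written with the same gated update expression as A's row set
theorem pvStepB_cons (p : Int) (ps : List Int) (subset : List String)
    (h : List String) (hs : List (List String)) (kv : String × List (Int × Int)) :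
    pvStepB (p :: ps) subset (h :: hs) kv
      = (if (!subset.isEmpty && !subset.contains kv.1) = true then h
         else if (pvScanA p kv.2).2 = true then PySem.Set.add h kv.1 else h)
        :: pvStepB ps subset hs (kv.1, pvAdvance p kv.2) := by
  by_cases hg : (!subset.isEmpty && !subset.contains kv.1) = true
  · have e1 : pvStepB (p :: ps) subset (h :: hs) kv = h :: hs := by
      unfold pvStepB; rw [if_pos hg]
    have e2 : pvStepB ps subset hs (kv.1, pvAdvance p kv.2) = hs := by
      unfold pvStepB; exact if_pos hg
    rw [e1, e2, if_pos hg]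
  · have e1 : pvStepB (p :: ps) subset (h :: hs) kv = pvMarkB kv.1 (p :: ps) kv.2 (h :: hs) := by
      unfold pvStepB; rw [if_neg hg]
    have e2 : pvStepB ps subset hs (kv.1, pvAdvance p kv.2) = pvMarkB kv.1 ps (pvAdvance p kv.2) hs := by
      unfold pvStepB; exact if_neg hg
    rw [e1, e2, if_neg hg]
    simp only [pvMarkB]
    congr 1
    rw [pvScanA_hit p kv.2]
    cases hadv : pvAdvance p kv.2 with
    | nil => simp
    | cons iv rest => by_cases hle : iv.1 ≤ p <;> simp [hle]

theorem rowsA_peel (subset : List String) :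
    ∀ (vps : List Int) (hits : List (List String)) (kv : String × List (Int × Int))
      (anns : List (String × List (Int × Int))),
    hits.length = vps.length →
    pvRowsA subset vps (kv :: anns) hits
      = pvRowsA subset vps anns (pvStepB vps subset hits kv) := by
  intro vps
  induction vps with
  | nil =>
    intro hits kv anns hlen
    have h0 : hits = [] := List.length_eq_zero_iff.mp (by simpa using hlen)
    subst h0
    show ([] : List (List String)) = pvStepB [] subset [] kv
    unfold pvStepB
    split <;> rfl
  | cons p ps ih =>
    intro hits kv anns hlen
    cases hits with
    | nil => simp at hlen
    | cons h hs =>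
      have hlen' : hs.length = ps.length := by simpa using hlen
      rw [pvStepB_cons]
      simp only [pvRowsA, List.foldl_cons]
      rw [pvInnerA_eq, foldl_innerA_seed, List.nil_append, List.singleton_append]
      congr 1
      rw [pvScanA_drop, ih hs (kv.1, pvAdvance p kv.2) _ hlen']

theorem rowsA_nil (subset : List String) :
    ∀ (vps : List Int) (hits : List (List String)), hits.length = vps.length →
    pvRowsA subset vps [] hits = hits := by
  intro vps
  induction vps with
  | nil =>
    intro hits hlen
    have h0 : hits = [] := List.length_eq_zero_iff.mp (by simpa using hlen)
    subst h0; rfl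
  | cons p ps ih =>
    intro hits hlen
    cases hits with
    | nil => simp at hlen
    | cons h hs =>
      simp only [pvRowsA, List.foldl_nil]
      rw [ih hs (by simpa using hlen)]

theorem foldl_stepB_rowsA (subset : List String) :
    ∀ (anns : List (String × List (Int × Int))) (vps : List Int) (hits : List (List String)),
    hits.length = vps.length →
    anns.foldl (pvStepB vps subset) hits = pvRowsA subset vps anns hits := by
  intro anns
  induction anns with
  | nil => intro vps hits hlen; simp [rowsA_nil subset vps hits hlen]
  | cons kv anns ih =>
    intro vps hits hlen
    simp only [List.foldl_cons]
    rw [ih vps _ (by rw [pvStepB_length vps subset hits kv hlen]; exact hlen)]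
    rw [rowsA_peel subset vps hits kv anns hlen]

theorem A_eq_rowsA (subset : List String) :
    ∀ (vps : List Int) (anns : List (String × List (Int × Int))),
    annotate_variants vps anns subset = pvRowsA subset vps anns (vps.map fun _ => ([] : List String)) := by
  intro vps
  induction vps with
  | nil => intro anns; rfl
  | cons p ps ih =>
    intro anns
    simp only [annotate_variants, List.map_cons, pvRowsA]
    rw [ih]

-- ===== VERDICT (by name: the statement is the Claim_ definition above) =====
theorem annotate_variants_spec : Claim_equal_annotate_variants := by
  intro vps anns subset _
  unfold Spec_annotate_variants annotate_variants_alt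
  rw [foldl_stepB_rowsA subset anns vps _ (by simp), A_eq_rowsA]
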